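-- pv_equiv track=rewrite | github.com/kgermeroth/Code-Challenges | lazy-lemmings/lemmings.py | furthest
-- ===== SOURCE A (Python) =====
-- def furthest(num_holes, cafes):
--     """Find longest distance between a hole and a cafe."""
--
--     # set a farthest counter
--     farthest = 0
--
--     # loop through lemming hole locations
--     for num in range(num_holes):
--
--         # find the shortest distance from lemming hole (num) to cafe
--         smallest_distance = num_holes - 1
--
--         for cafe in cafes:
--
--             distance = abs(cafe - num)
--
--             if distance < smallest_distance:
--                 smallest_distance = distance
--
--         if smallest_distance > farthest:
--             farthest = smallest_distance
--
--     return farthest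
-- ===== SOURCE B (Python) =====
-- def furthest(num_holes, cafes):
--     """Find longest distance between a hole and a cafe."""
--     cs = sorted(cafes)
--     m = len(cs)
--     j = 0
--     far = 0
--     for h in range(num_holes):
--         # advance j to the number of cafes <= h (cs is sorted, h increases)
--         while j < m and cs[j] <= h:
--             j += 1
--         sd = num_holes - 1
--         if j > 0 and h - cs[j - 1] < sd:
--             sd = h - cs[j - 1]
--         if j < m and cs[j] - h < sd:
--             sd = cs[j] - h
--         if sd > far:
--             far = sd
--     return far
-- ===== Notes on version B (the rewrite author's own statement) =====
-- stated objective: faster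
-- what changed: A scans all cafes for every hole (nested loops); B sorts the cafes once and sweeps the holes in order with a monotone pointer, so each hole only compares against its two sorted neighbours.
import Mathlib
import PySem

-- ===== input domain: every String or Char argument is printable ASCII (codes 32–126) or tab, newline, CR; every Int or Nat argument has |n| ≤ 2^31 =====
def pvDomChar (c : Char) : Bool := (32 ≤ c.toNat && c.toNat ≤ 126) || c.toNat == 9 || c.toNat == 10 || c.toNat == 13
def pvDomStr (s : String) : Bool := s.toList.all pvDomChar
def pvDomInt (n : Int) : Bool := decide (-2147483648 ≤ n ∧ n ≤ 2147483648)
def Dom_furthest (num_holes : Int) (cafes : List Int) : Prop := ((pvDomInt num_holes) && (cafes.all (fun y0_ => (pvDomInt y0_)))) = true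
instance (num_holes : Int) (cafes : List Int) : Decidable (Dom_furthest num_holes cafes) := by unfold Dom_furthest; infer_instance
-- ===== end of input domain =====

-- B replaces A's per-hole scan of all cafes by one sort of the cafes plus a merge-style
-- sweep with a monotone pointer (objective: faster; measured).


-- ===== PORT A =====
def furthest (num_holes : Int) (cafes : List Int) : Int :=
  (PySem.List.pyRange 0 num_holes 1).foldl
    (fun farthest num =>
      let smallest_distance := cafes.foldl
        (fun smallest_distance cafe =>
          let distance := |cafe - num|
          if distance < smallest_distance then distance else smallest_distance)
        (num_holes - 1)
      if smallest_distance > farthest then smallest_distance else farthest)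
    0

-- ===== PORT B =====
-- the inner `while j < m and cs[j] <= h: j += 1` loop of Source B
def advanceB (cs : List Int) (h : Int) (j : Nat) : Nat :=
  if hj : j < cs.length then
    if cs[j] ≤ h then advanceB cs h (j + 1) else j
  else j
termination_by cs.length - j

def furthest_alt (num_holes : Int) (cafes : List Int) : Int :=
  let cs := PySem.List.sorted cafes (fun x => x) false
  let m := cs.length
  ((PySem.List.pyRange 0 num_holes 1).foldl
    (fun (st : Nat × Int) h =>
      let j := advanceB cs h st.1
      let sd0 := num_holes - 1
      let sd1 := if 0 < j ∧ h - cs.getD (j - 1) 0 < sd0 then h - cs.getD (j - 1) 0 else sd0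
      let sd2 := if j < m ∧ cs.getD j 0 - h < sd1 then cs.getD j 0 - h else sd1
      (j, if sd2 > st.2 then sd2 else st.2))
    (0, 0)).2

-- ===== PRECONDITION & SPEC =====
def Spec_furthest (num_holes : Int) (cafes : List Int) (out : Int) : Prop := out = furthest_alt num_holes cafes
instance (num_holes : Int) (cafes : List Int) (out : Int) : Decidable (Spec_furthest num_holes cafes out) := by unfold Spec_furthest; infer_instance

-- ===== CLAIM (what is proved, stated in full; the proofs are below) =====
def Claim_equal_furthest : Prop := ∀ (num_holes : Int) (cafes : List Int), Dom_furthest num_holes cafes → Spec_furthest num_holes cafes (furthest num_holes cafes)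

-- ===== LEMMAS AND PROOFS =====

-- number of leading cafes ≤ h in the sorted list cs (what B's pointer j tracks)
def kf (cs : List Int) (h : Int) : Nat := (cs.takeWhile (fun c => c ≤ h)).length

lemma kf_le (cs : List Int) (h : Int) : kf cs h ≤ cs.length :=
  (List.takeWhile_sublist _).length_le

lemma kf_split (cs : List Int) (h : Int) :
    cs.takeWhile (fun c => decide (c ≤ h)) ++ cs.dropWhile (fun c => decide (c ≤ h)) = cs :=
  List.takeWhile_append_dropWhile

lemma kf_len (cs : List Int) (h : Int) :
    cs.length = kf cs h + (cs.dropWhile (fun c => decide (c ≤ h))).length := by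
  conv_lhs => rw [← kf_split cs h]
  simp only [List.length_append, kf]

lemma kf_char1 (cs : List Int) (h : Int) {i : Nat} (hi : i < kf cs h)
    (hlen : i < cs.length) : cs[i] ≤ h := by
  have hg : cs[i] = (cs.takeWhile (fun c => decide (c ≤ h)) ++ cs.dropWhile (fun c => decide (c ≤ h)))[i]'((kf_split cs h).symm ▸ hlen) :=
    List.getElem_of_eq (kf_split cs h).symm hlen
  rw [hg, List.getElem_append_left hi]
  have hmem : (cs.takeWhile (fun c => decide (c ≤ h)))[i]'hi ∈ cs.takeWhile (fun c => decide (c ≤ h)) :=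
    List.getElem_mem _
  simpa using List.mem_takeWhile_imp hmem

lemma kf_char2 (cs : List Int) (h : Int) (hlen : kf cs h < cs.length) :
    h < cs[kf cs h] := by
  have hd0 : 0 < (cs.dropWhile (fun c => decide (c ≤ h))).length := by
    have := kf_len cs h; omega
  have hdne : cs.dropWhile (fun c => decide (c ≤ h)) ≠ [] := List.ne_nil_of_length_pos hd0
  have hhead := List.head_dropWhile_not (fun c => decide (c ≤ h)) hdne
  rw [List.head_eq_getElem] at hhead
  simp only [decide_eq_false_iff_not, not_le] at hhead
  have hg : cs[kf cs h] = (cs.takeWhile (fun c => decide (c ≤ h)) ++ cs.dropWhile (fun c => decide (c ≤ h)))[kf cs h]'((kf_split cs h).symm ▸ hlen) :=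
    List.getElem_of_eq (kf_split cs h).symm hlen
  have htl : (cs.takeWhile (fun c => decide (c ≤ h))).length = kf cs h := rfl
  have hidx : kf cs h - (cs.takeWhile (fun c => decide (c ≤ h))).length = 0 := by
    simp [kf]
  rw [hg, List.getElem_append_right htl.le]
  simp only [hidx]
  exact hhead

lemma kf_mono (cs : List Int) {h h' : Int} (hh : h ≤ h') : kf cs h ≤ kf cs h' := by
  by_contra hlt
  rw [not_le] at hlt
  have h1 : kf cs h' < cs.length := lt_of_lt_of_le hlt (kf_le cs h)
  have h2 : cs[kf cs h'] ≤ h := kf_char1 cs h hlt h1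
  have h3 : h' < cs[kf cs h'] := kf_char2 cs h' h1
  omega

lemma advanceB_eq (cs : List Int) (h : Int) :
    ∀ j, j ≤ kf cs h → advanceB cs h j = kf cs h := by
  intro j hj
  induction hn : cs.length - j generalizing j with
  | zero =>
    have hk := kf_le cs h
    have hjk : j = kf cs h := by omega
    subst hjk
    rw [advanceB]
    split
    · next hlt =>
      have := kf_char2 cs h hlt
      rw [if_neg (by omega)]
    · rfl
  | succ n ih =>
    rw [advanceB]
    split
    · next hlt =>
      rcases lt_or_eq_of_le hj with hjlt | hje
      · rw [if_pos (kf_char1 cs h hjlt hlt)]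
        exact ih (j + 1) hjlt (by omega)
      · subst hje
        have := kf_char2 cs h hlt
        rw [if_neg (by omega)]
    · next hge =>
      have := kf_le cs h
      omega

lemma fold_noop (h : Int) :
    ∀ (d : List Int) (i : Int), (∀ c ∈ d, i ≤ |c - h|) →
      d.foldl (fun sd c => if |c - h| < sd then |c - h| else sd) i = i := by
  intro d
  induction d with
  | nil => intro i _; rfl
  | cons c d ih =>
    intro i hall
    have hc : i ≤ |c - h| := hall c (by simp)
    simp only [List.foldl_cons]
    rw [if_neg (not_lt.mpr hc)]
    exact ih i (fun x hx => hall x (by simp [hx]))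

lemma fold_suffix (h : Int) :
    ∀ (d : List Int) (i : Int), d.Pairwise (· ≤ ·) → (∀ c ∈ d, h < c) →
      d.foldl (fun sd c => if |c - h| < sd then |c - h| else sd) i =
        (match d.head? with | none => i | some x => min i (x - h)) := by
  intro d
  induction d with
  | nil => intro i _ _; rfl
  | cons c d ih =>
    intro i hp hall
    have hc : h < c := hall c (by simp)
    have habs : |c - h| = c - h := abs_of_pos (by omega)
    have hstep : (if |c - h| < i then |c - h| else i) = min i (c - h) := by
      rw [habs]; omega
    simp only [List.foldl_cons, hstep]
    rw [fold_noop h d (min i (c - h)) ?bound]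
    · simp
    case bound =>
      intro x hx
      have hcx : c ≤ x := (List.pairwise_cons.mp hp).1 x hx
      have hhx : h < x := hall x (by simp [hx])
      rw [abs_of_pos (by omega : (0:Int) < x - h)]
      omega

lemma fold_prefix (h : Int) :
    ∀ (t : List Int) (i : Int), t.Pairwise (· ≤ ·) → (∀ c ∈ t, c ≤ h) →
      t.foldl (fun sd c => if |c - h| < sd then |c - h| else sd) i =
        (match t.getLast? with | none => i | some x => min i (h - x)) := by
  intro t
  induction t with
  | nil => intro i _ _; rfl
  | cons c t ih =>
    intro i hp hall
    have hc : c ≤ h := hall c (by simp)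
    have habs : |c - h| = h - c := by
      rw [abs_sub_comm]; exact abs_of_nonneg (by omega)
    have hstep : (if |c - h| < i then |c - h| else i) = min i (h - c) := by
      rw [habs]; omega
    simp only [List.foldl_cons, hstep]
    rw [ih (min i (h - c)) (List.pairwise_cons.mp hp).2
        (fun x hx => hall x (by simp [hx]))]
    cases t with
    | nil => simp
    | cons c' t' =>
      have hne : (c' :: t' : List Int) ≠ [] := by simp
      obtain ⟨x, hx⟩ := Option.isSome_iff_exists.mp (List.getLast?_isSome.mpr hne)
      have hxmem : x ∈ c' :: t' := List.mem_of_getLast? hx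
      have hcx : c ≤ x := (List.pairwise_cons.mp hp).1 x hxmem
      rw [List.getLast?_cons_cons, hx]
      simp only
      omega

-- on a sorted cs the whole inner fold is decided by the two neighbours of h
lemma inner_eq (cs : List Int) (h i : Int) (hp : cs.Pairwise (· ≤ ·)) :
    cs.foldl (fun sd c => if |c - h| < sd then |c - h| else sd) i =
      (if kf cs h < cs.length ∧
          cs.getD (kf cs h) 0 - h <
            (if 0 < kf cs h ∧ h - cs.getD (kf cs h - 1) 0 < i then h - cs.getD (kf cs h - 1) 0 else i)
       then cs.getD (kf cs h) 0 - h
       else (if 0 < kf cs h ∧ h - cs.getD (kf cs h - 1) 0 < i then h - cs.getD (kf cs h - 1) 0 else i)) := by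
  have hsplit := kf_split cs h
  have hlen := kf_len cs h
  have hpt : (cs.takeWhile (fun c => decide (c ≤ h))).Pairwise (· ≤ ·) :=
    hp.sublist (List.takeWhile_sublist _)
  have hpd : (cs.dropWhile (fun c => decide (c ≤ h))).Pairwise (· ≤ ·) :=
    hp.sublist (List.dropWhile_sublist _)
  have hallt : ∀ c ∈ cs.takeWhile (fun c => decide (c ≤ h)), c ≤ h := by
    intro c hc; simpa using List.mem_takeWhile_imp hc
  have halld : ∀ c ∈ cs.dropWhile (fun c => decide (c ≤ h)), h < c := by
    intro c hc
    obtain ⟨n, hn, hcn⟩ := List.mem_iff_getElem.mp hc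
    have hb : kf cs h + n < cs.length := by omega
    have hkfl : kf cs h < cs.length := by omega
    have hg : cs[kf cs h + n]'hb =
        (cs.takeWhile (fun c => decide (c ≤ h)) ++ cs.dropWhile (fun c => decide (c ≤ h)))[kf cs h + n]'(hsplit.symm ▸ hb) :=
      List.getElem_of_eq hsplit.symm hb
    have htl : (cs.takeWhile (fun c => decide (c ≤ h))).length = kf cs h := rfl
    have hg2 : cs[kf cs h + n]'hb = c := by
      rw [hg, List.getElem_append_right (by omega)]
      rw [← hcn]
      congr 1
      omega
    have h1 : h < cs[kf cs h]'hkfl := kf_char2 cs h hkfl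
    rcases Nat.eq_zero_or_pos n with hn0 | hn0
    · subst hn0
      rw [← hg2]
      simpa using h1
    · have h2 : cs[kf cs h]'hkfl ≤ cs[kf cs h + n]'hb :=
        (List.pairwise_iff_getElem.mp hp) _ _ hkfl hb (by omega)
      rw [hg2] at h2
      omega
  conv_lhs => rw [← hsplit]
  rw [List.foldl_append, fold_prefix h _ i hpt hallt, fold_suffix h _ _ hpd halld]
  have htl : (cs.takeWhile (fun c => decide (c ≤ h))).length = kf cs h := rfl
  -- bridge getLast? / head? to getD's of cs
  have hlast : cs.takeWhile (fun c => decide (c ≤ h)) ≠ [] →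
      (cs.takeWhile (fun c => decide (c ≤ h))).getLast? = some (cs.getD (kf cs h - 1) 0) := by
    intro hne
    have hpos : 0 < kf cs h := by
      have := List.length_pos_of_ne_nil hne; omega
    rw [List.getLast?_eq_getLast hne, List.getLast_eq_getElem hne]
    congr 1
    have hb : kf cs h - 1 < cs.length := by omega
    rw [List.getD_eq_getElem cs 0 hb]
    have hg : cs[kf cs h - 1]'hb =
        (cs.takeWhile (fun c => decide (c ≤ h)) ++ cs.dropWhile (fun c => decide (c ≤ h)))[kf cs h - 1]'(hsplit.symm ▸ hb) :=
      List.getElem_of_eq hsplit.symm hb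
    rw [hg, List.getElem_append_left (by omega)]
    congr 1
  have hhead : cs.dropWhile (fun c => decide (c ≤ h)) ≠ [] →
      (cs.dropWhile (fun c => decide (c ≤ h))).head? = some (cs.getD (kf cs h) 0) := by
    intro hne
    have hpos : 0 < (cs.dropWhile (fun c => decide (c ≤ h))).length :=
      List.length_pos_of_ne_nil hne
    rw [List.head?_eq_head hne, List.head_eq_getElem]
    congr 1
    have hb : kf cs h < cs.length := by omega
    rw [List.getD_eq_getElem cs 0 hb]
    have hg : cs[kf cs h]'hb =
        (cs.takeWhile (fun c => decide (c ≤ h)) ++ cs.dropWhile (fun c => decide (c ≤ h)))[kf cs h]'(hsplit.symm ▸ hb) :=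
      List.getElem_of_eq hsplit.symm hb
    rw [hg, List.getElem_append_right htl.le]
    congr 1
    omega
  by_cases ht0 : cs.takeWhile (fun c => decide (c ≤ h)) = []
  · have h0 : kf cs h = 0 := by rw [kf]; simpa using congrArg List.length ht0
    have hL : (cs.takeWhile (fun c => decide (c ≤ h))).getLast? = none := by
      rw [ht0]; rfl
    rw [hL]
    by_cases hd0 : cs.dropWhile (fun c => decide (c ≤ h)) = []
    · have hd0' : (cs.dropWhile (fun c => decide (c ≤ h))).length = 0 := by rw [hd0]; rfl
      have hH : (cs.dropWhile (fun c => decide (c ≤ h))).head? = none := by rw [hd0]; rfl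
      rw [hH]
      simp only
      split_ifs <;> omega
    · rw [hhead hd0]
      have hdpos := List.length_pos_of_ne_nil hd0
      simp only
      split_ifs <;> omega
  · rw [hlast ht0]
    have htpos : 0 < kf cs h := by
      have := List.length_pos_of_ne_nil ht0; omega
    by_cases hd0 : cs.dropWhile (fun c => decide (c ≤ h)) = []
    · have hd0' : (cs.dropWhile (fun c => decide (c ≤ h))).length = 0 := by rw [hd0]; rfl
      have hH : (cs.dropWhile (fun c => decide (c ≤ h))).head? = none := by rw [hd0]; rfl
      rw [hH]
      simp only
      split_ifs <;> omega
    · rw [hhead hd0]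
      have hdpos := List.length_pos_of_ne_nil hd0
      simp only
      split_ifs <;> omega

-- the two outer loops agree, carrying B's pointer invariant
lemma loop_eq (N : Int) (cafes : List Int) :
    ∀ (hs : List Int) (j : Nat) (far : Int),
      hs.Pairwise (· ≤ ·) →
      (∀ h ∈ hs, j ≤ kf (PySem.List.sorted cafes (fun x => x) false) h) →
      hs.foldl
        (fun farthest num =>
          let smallest_distance := cafes.foldl
            (fun smallest_distance cafe =>
              let distance := |cafe - num|
              if distance < smallest_distance then distance else smallest_distance)
            (N - 1)
          if smallest_distance > farthest then smallest_distance else farthest)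
        far
      = (hs.foldl
          (fun (st : Nat × Int) h =>
            let cs := PySem.List.sorted cafes (fun x => x) false
            let j := advanceB cs h st.1
            let sd0 := N - 1
            let sd1 := if 0 < j ∧ h - cs.getD (j - 1) 0 < sd0 then h - cs.getD (j - 1) 0 else sd0
            let sd2 := if j < cs.length ∧ cs.getD j 0 - h < sd1 then cs.getD j 0 - h else sd1
            (j, if sd2 > st.2 then sd2 else st.2))
          (j, far)).2 := by
  intro hs
  induction hs with
  | nil => intro j far _ _; rfl
  | cons h hs ih =>
    intro j far hpw hinv
    set cs := PySem.List.sorted cafes (fun x => x) false with hcs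
    have hpcs : cs.Pairwise (· ≤ ·) :=
      PySem.List.sorted_pairwise (xs := cafes) (key := fun x => x)
    have hperm : cs.Perm cafes := PySem.List.sorted_perm cafes (fun x => x) false
    have hadv : advanceB cs h j = kf cs h :=
      advanceB_eq cs h j (hinv h (by simp))
    haveI hrc : RightCommutative (fun (sd c : Int) => if |c - h| < sd then |c - h| else sd) := by
      constructor
      intro b x y
      have h1 : (0:Int) ≤ |x - h| := abs_nonneg _
      have h2 : (0:Int) ≤ |y - h| := abs_nonneg _
      generalize |x - h| = dx at *
      generalize |y - h| = dy at *
      split_ifs <;> omega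
    have hfold : cafes.foldl
        (fun smallest_distance cafe =>
          if |cafe - h| < smallest_distance then |cafe - h| else smallest_distance)
        (N - 1)
        = cs.foldl (fun sd c => if |c - h| < sd then |c - h| else sd) (N - 1) :=
      (List.Perm.foldl_eq hperm (N - 1)).symm
    have hstate : (let cs' := cs
            let j' := advanceB cs' h (j, far).1
            let sd0 := N - 1
            let sd1 := if 0 < j' ∧ h - cs'.getD (j' - 1) 0 < sd0 then h - cs'.getD (j' - 1) 0 else sd0
            let sd2 := if j' < cs'.length ∧ cs'.getD j' 0 - h < sd1 then cs'.getD j' 0 - h else sd1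
            (j', if sd2 > (j, far).2 then sd2 else (j, far).2))
        = (kf cs h,
            if (cafes.foldl
                (fun smallest_distance cafe =>
                  if |cafe - h| < smallest_distance then |cafe - h| else smallest_distance)
                (N - 1)) > far
            then (cafes.foldl
                (fun smallest_distance cafe =>
                  if |cafe - h| < smallest_distance then |cafe - h| else smallest_distance)
                (N - 1))
            else far) := by
      dsimp only
      rw [hadv, hfold, inner_eq cs h (N - 1) hpcs]
    rw [List.foldl_cons, List.foldl_cons, hstate]
    exact ih (kf cs h) _ (List.pairwise_cons.mp hpw).2
      (fun h' hh' => kf_mono cs ((List.pairwise_cons.mp hpw).1 h' hh'))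

-- ===== VERDICT (by name: the statement is the Claim_ definition above) =====
theorem furthest_spec : Claim_equal_furthest := by
  intro N cafes _
  unfold Spec_furthest furthest furthest_alt
  have hpw : (PySem.List.pyRange 0 N 1).Pairwise (· ≤ ·) :=
    (PySem.List.pairwise_lt_pyRange_one 0 N).imp (fun h => le_of_lt h)
  exact loop_eq N cafes (PySem.List.pyRange 0 N 1) 0 0 hpw (fun _ _ => Nat.zero_le _)
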